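-- pv_equiv track=rewrite | github.com/flowykk/Montesume | PROJECT/__init__.py | mas_processing
-- ===== SOURCE A (Python) =====
-- def mas_processing(mas):
--     result = ''
--     for i in range(len(mas)):
--         if i != len(mas) - 1:
--             result += word_processing(str(mas[i])) + ', '
--         else:
--             result += word_processing(str(mas[i]))
--     return result
--
-- def word_processing(word):
--     while "  " in word:
--         word = word.replace("  ", " ")
--     return word
-- ===== SOURCE B (Python) =====
-- def mas_processing(mas):
--     parts = []
--     for x in mas:
--         out = []
--         for ch in str(x):
--             if ch == ' ' and out and out[-1] == ' ':
--                 continue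
--             out.append(ch)
--         parts.append(''.join(out))
--     return ', '.join(parts)
-- ===== Notes on version B (the rewrite author's own statement) =====
-- stated objective: alternative
-- what changed: Replaces the fixpoint loop of whole-string replace(' ',' ') passes with a single forward character scan that skips a space whenever the previously emitted character was a space, and joins the pieces with str.join instead of an index loop with a last-element test.
import Mathlib
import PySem

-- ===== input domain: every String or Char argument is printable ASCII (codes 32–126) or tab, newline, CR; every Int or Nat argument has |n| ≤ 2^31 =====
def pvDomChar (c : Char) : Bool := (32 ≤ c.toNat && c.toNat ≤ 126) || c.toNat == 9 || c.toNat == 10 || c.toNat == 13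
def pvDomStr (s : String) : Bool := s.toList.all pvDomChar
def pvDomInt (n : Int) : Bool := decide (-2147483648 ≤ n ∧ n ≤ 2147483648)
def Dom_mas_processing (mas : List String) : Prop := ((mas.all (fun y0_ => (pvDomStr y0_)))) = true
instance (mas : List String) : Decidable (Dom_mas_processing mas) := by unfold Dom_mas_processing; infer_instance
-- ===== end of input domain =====

-- B replaces A's repeated whole-string replace('  ',' ') passes with one linear scan that
-- drops a space whose previously emitted character is a space, and joins with ', '.join.

-- ===== PORT A =====
-- one left-to-right pass of word.replace("  ", " "); used only to prove the while-loop terminates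
def passA : List Char → List Char
  | [] => []
  | [c] => [c]
  | a :: b :: t => if a = ' ' ∧ b = ' ' then ' ' :: passA t else a :: passA (b :: t)

theorem passA_length_le : ∀ (l : List Char), (passA l).length ≤ l.length := by
  intro l
  induction l using passA.induct with
  | case1 => simp [passA]
  | case2 => simp [passA]
  | case3 a b t h ih => simp only [passA, if_pos h, List.length_cons]; omega
  | case4 a b t h ih => simp only [passA, if_neg h, List.length_cons] at *; omega

theorem replaceA_go_eq : ∀ (fuel : Nat) (l acc : List Char), l.length ≤ fuel →
    PySem.Chars.replace.go [' ', ' '] [' '] fuel l acc = acc.reverse ++ passA l := by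
  intro fuel
  induction fuel with
  | zero => intro l acc h; rw [List.length_eq_zero_iff.mp (Nat.le_zero.mp h)]; simp [PySem.Chars.replace.go, passA]
  | succ n ih =>
    intro l acc h
    match l with
    | [] => simp [PySem.Chars.replace.go, passA]
    | [c] =>
      rw [PySem.Chars.replace.go]
      have : ¬ List.isPrefixOf [' ', ' '] [c] = true := by
        simp [List.isPrefixOf]
      simp only [this]
      rw [ih [] (c :: acc) (by simp)]
      simp [passA]
    | a :: b :: t =>
      rw [PySem.Chars.replace.go]
      by_cases hab : a = ' ' ∧ b = ' '
      · have hp : List.isPrefixOf [' ', ' '] (a :: b :: t) = true := by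
          simp [List.isPrefixOf, hab.1, hab.2]
        simp only [hp, if_true]
        have ht : t.length ≤ n := by simp at h; omega
        rw [show List.drop [' ', ' '].length (a :: b :: t) = t by simp]
        rw [ih t ([' '].reverse ++ acc) ht]
        simp [passA, hab]
      · have hp : ¬ List.isPrefixOf [' ', ' '] (a :: b :: t) = true := by
          simp [List.isPrefixOf]
          intro h1 h2; exact hab ⟨h1.symm, h2.symm⟩
        simp only [hp]
        have ht : (b :: t).length ≤ n := by simp at h ⊢; omega
        rw [ih (b :: t) (a :: acc) ht]
        simp [passA, hab]

theorem replaceA_eq_passA (l : List Char) :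
    PySem.Chars.replace l [' ', ' '] [' '] = passA l := by
  rw [PySem.Chars.replace]
  simp only [List.isEmpty_iff, reduceCtorEq, if_false]
  exact replaceA_go_eq l.length l [] le_rfl

theorem passA_length_lt : ∀ (l : List Char), [' ', ' '] <:+: l → (passA l).length < l.length := by
  intro l
  induction l using passA.induct with
  | case1 => intro h; exact absurd (List.IsInfix.length_le h) (by simp)
  | case2 c => intro h; exact absurd (List.IsInfix.length_le h) (by simp)
  | case3 a b t h ih =>
    intro _
    have := passA_length_le t
    simp only [passA, if_pos h, List.length_cons]; omega
  | case4 a b t h ih =>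
    intro hinf
    obtain ⟨l₁, l₂, heq⟩ := hinf
    match l₁, heq with
    | [], heq =>
      injection heq with e1 rest
      injection rest with e2 _
      exact absurd ⟨e1.symm, e2.symm⟩ h
    | c :: l₁', heq =>
      have hinf2 : [' ', ' '] <:+: b :: t := ⟨l₁', l₂, by injection heq⟩
      have h2 := ih hinf2
      simp only [passA, if_neg h, List.length_cons] at h2 ⊢
      omega

-- word_processing(word): while "  " in word: word = word.replace("  ", " ")
def wpA (w : List Char) : List Char :=
  if PySem.Chars.isIn [' ', ' '] w then wpA (PySem.Chars.replace w [' ', ' '] [' ']) else w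
termination_by w.length
decreasing_by
  rw [replaceA_eq_passA]
  exact passA_length_lt w ((PySem.Chars.isIn_iff_infix _ _).mp (by assumption))

def mas_processing (mas : List String) : String :=
  String.ofList <|
    (PySem.List.pyRange 0 mas.length 1).foldl
      (fun result i =>
        if i ≠ (mas.length : Int) - 1 then
          result ++ wpA (PySem.List.pyGetD mas i "").toList ++ [',', ' ']
        else
          result ++ wpA (PySem.List.pyGetD mas i "").toList)
      []

-- ===== PORT B =====
-- 'out and out[-1] == " "' on the reversed accumulator
def headIsSpace : List Char → Bool
  | c :: _ => c == ' '
  | [] => false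

-- the inner scan: skip a space when the last emitted character is a space
def scanB (s : List Char) : List Char :=
  (s.foldl (fun out c => if c = ' ' ∧ headIsSpace out then out else c :: out) []).reverse

def mas_processing_alt (mas : List String) : String :=
  PySem.Str.join ", " (mas.map (fun x => String.ofList (scanB x.toList)))

-- ===== PRECONDITION & SPEC =====
def Spec_mas_processing (mas : List String) (out : String) : Prop := out = mas_processing_alt mas
instance (mas : List String) (out : String) : Decidable (Spec_mas_processing mas out) := by unfold Spec_mas_processing; infer_instance

-- ===== CLAIM (what is proved, stated in full; the proofs are below) =====
def Claim_equal_mas_processing : Prop := ∀ (mas : List String), Dom_mas_processing mas → Spec_mas_processing mas (mas_processing mas)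

-- ===== LEMMAS AND PROOFS =====

-- canonical collapse with a 'previous emitted char was a space' flag
def sqz : Bool → List Char → List Char
  | _, [] => []
  | prev, c :: t => if c = ' ' ∧ prev = true then sqz prev t else c :: sqz (c == ' ') t

theorem sq_passA : ∀ (l : List Char) (prev : Bool), sqz prev (passA l) = sqz prev l := by
  intro l
  induction l using passA.induct with
  | case1 => intro prev; rfl
  | case2 c => intro prev; rfl
  | case3 a b t h ih =>
    intro prev
    obtain ⟨ha, hb⟩ := h
    subst ha hb
    cases prev with
    | true => simp [passA, sqz, ih]
    | false => simp [passA, sqz, ih]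
  | case4 a b t h ih =>
    intro prev
    simp only [passA, if_neg h]
    by_cases hp : a = ' ' ∧ prev = true
    · simp only [sqz, if_pos hp]; exact ih prev
    · simp only [sqz, if_neg hp]; rw [ih, sqz]

theorem sq_id : ∀ (l : List Char) (prev : Bool), ¬ ([' ', ' '] <:+: l) →
    (prev = true → l.head? ≠ some ' ') → sqz prev l = l := by
  intro l
  induction l with
  | nil => intro prev _ _; rfl
  | cons c t ih =>
    intro prev hinf hhead
    have hcp : ¬ (c = ' ' ∧ prev = true) := by
      rintro ⟨hc, hp⟩
      exact hhead hp (by simp [hc])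
    simp only [sqz, if_neg hcp]
    congr 1
    apply ih
    · intro hin
      obtain ⟨u, v, huv⟩ := hin
      exact hinf ⟨c :: u, v, by simp [← huv]⟩
    · intro hsp ht
      apply hinf
      have hc : c = ' ' := by simpa using hsp
      cases t with
      | nil => simp at ht
      | cons d t' =>
        have hd : d = ' ' := by simpa using ht
        exact ⟨[], t', by simp [hc, hd]⟩

theorem wpA_eq_sq : ∀ (l : List Char), wpA l = sqz false l := by
  intro l
  induction l using wpA.induct with
  | case1 l hin ih =>
    rw [wpA, if_pos hin, ih, replaceA_eq_passA, sq_passA]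
  | case2 l hin =>
    rw [wpA, if_neg hin]
    have := (PySem.Chars.isIn_eq_false_iff [' ', ' '] l).mp (by simpa using hin)
    exact (sq_id l false this (by simp)).symm

theorem scanB_go : ∀ (l out : List Char),
    (l.foldl (fun out c => if c = ' ' ∧ headIsSpace out then out else c :: out) out).reverse
      = out.reverse ++ sqz (headIsSpace out) l := by
  intro l
  induction l with
  | nil => intro out; simp [sqz]
  | cons c t ih =>
    intro out
    by_cases h : c = ' ' ∧ headIsSpace out = true
    · simp only [List.foldl_cons, sqz, h.1, h.2, ih]
      simp
      rw [h.2]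
    · simp only [List.foldl_cons, ih, sqz, if_neg h]
      have : headIsSpace (c :: out) = (c == ' ') := rfl
      rw [this]
      simp
theorem scanB_eq_sq (l : List Char) : scanB l = sqz false l := by
  have := scanB_go l []
  simpa [scanB, headIsSpace] using this

theorem intercalate_snoc (sep : List Char) :
    ∀ (l : List (List Char)) (x : List Char),
      List.intercalate sep (l ++ [x]) = l.flatMap (fun y => y ++ sep) ++ x := by
  intro l
  induction l with
  | nil => intro x; simp [List.intercalate]
  | cons a l ih =>
    intro x
    rcases l with _ | ⟨b, l'⟩ <;>
      simp_all [List.intercalate, List.intersperse, List.flatMap_cons]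

theorem outerA (g : String → List Char) : ∀ (mas : List String) (acc : List Char),
    (PySem.List.pyRange 0 mas.length 1).foldl
      (fun result i =>
        if i ≠ (mas.length : Int) - 1 then
          result ++ g (PySem.List.pyGetD mas i "") ++ [',', ' ']
        else
          result ++ g (PySem.List.pyGetD mas i ""))
      acc
    = acc ++ List.intercalate [',', ' '] (mas.map g) := by
  intro mas
  induction mas using List.reverseRecOn with
  | nil => intro acc; simp [PySem.List.pyRange, List.intercalate]
  | append_singleton ws w ih =>
    intro acc
    have hn : (0 : Int) ≤ (ws.length : Int) := by positivity
    rw [show ((ws ++ [w]).length : Int) = (ws.length : Int) + 1 by simp]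
    rw [PySem.List.pyRange_one_append 0 (ws.length : Int) ((ws.length : Int) + 1) hn (by omega)]
    rw [List.foldl_append]
    have hlast : PySem.List.pyRange (ws.length : Int) ((ws.length : Int) + 1) 1
        = [(ws.length : Int)] := by
      rw [PySem.List.pyRange_one_cons (by omega)]
      simp [PySem.List.pyRange]
    -- the prefix part: every i < ws.length takes the comma branch and reads ws
    have hpre : ∀ (acc' : List Char),
        (PySem.List.pyRange 0 (ws.length : Int) 1).foldl
          (fun result i =>
            if i ≠ ((ws.length : Int) + 1) - 1 then
              result ++ g (PySem.List.pyGetD (ws ++ [w]) i "") ++ [',', ' ']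
            else
              result ++ g (PySem.List.pyGetD (ws ++ [w]) i ""))
          acc'
        = acc' ++ ws.flatMap (fun y => g y ++ [',', ' ']) := by
      intro acc'
      rw [PySem.List.foldl_congr_mem _ _ (fun result i =>
            result ++ g (PySem.List.pyGetD ws i "") ++ [',', ' ']) acc' ?_]
      · have := PySem.List.foldl_pyRange_pyGetD ws ""
          (fun (r : List Char) (x : String) => r ++ g x ++ [',', ' ']) acc' (a := 0) le_rfl
        simp only [PySem.List.len] at this
        rw [this]
        simp only [Int.toNat_zero, List.drop_zero]
        have : List.foldl (fun (r : List Char) (x : String) => r ++ (g x ++ [',', ' '])) acc' ws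
            = acc' ++ ws.flatMap (fun y => g y ++ [',', ' ']) :=
          PySem.List.foldl_append_eq_flatMap _ ws acc'
        rw [← this]
        simp [List.append_assoc]
      · intro b i hi
        rw [PySem.List.mem_pyRange_iff_of_pos (by norm_num)] at hi
        obtain ⟨h0, hlt, -⟩ := hi
        have hne : i ≠ ((ws.length : Int) + 1) - 1 := by omega
        rw [if_pos hne]
        congr 2
        obtain ⟨k, rfl⟩ : ∃ k : Nat, i = (k : Int) := ⟨i.toNat, by omega⟩
        have hk : k < ws.length := by exact_mod_cast hlt
        rw [PySem.List.pyGetD_natCast, PySem.List.pyGetD_natCast]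
        rw [List.getD_eq_getElem _ _ hk, List.getD_eq_getElem _ _ (by simp; omega)]
        simp [List.getElem_append_left hk]
    rw [hpre, hlast]
    simp only [List.foldl_cons, List.foldl_nil, if_neg (by omega : ¬ ((ws.length : Int) ≠ ((ws.length : Int) + 1) - 1))]
    rw [PySem.List.pyGetD_natCast]
    rw [List.getD_eq_getElem _ _ (by simp)]
    rw [List.map_append, List.map_singleton, intercalate_snoc]
    simp [List.flatMap_map, List.append_assoc]

-- ===== VERDICT (by name: the statement is the Claim_ definition above) =====
theorem mas_processing_spec : Claim_equal_mas_processing := by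
  intro mas _
  unfold Spec_mas_processing
  apply String.toList_inj.mp
  rw [mas_processing]
  simp only [String.toList_ofList]
  rw [outerA (fun x => wpA x.toList) mas []]
  rw [mas_processing_alt, PySem.Str.toList_join]
  simp only [List.map_map, List.nil_append]
  rw [PySem.Chars.join]
  congr 1
  apply List.map_congr_left
  intro x _
  simp [Function.comp, wpA_eq_sq, scanB_eq_sq]
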